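-- pv_equiv track=rewrite | github.com/myst72/kogitune | kogitune/loads/metrics_python.py | format_error_lines
-- ===== SOURCE A (Python) =====
-- def format_error_lines(code, line_number):
--     code_lines = code.strip().split('\n')
--     formatted_code = ""
--     for i, line in enumerate(code_lines, 1):
--         if i == line_number:
--             formatted_code += f"----> {i} {line}\n"
--         elif line_number - 2 <= i <= line_number + 1:
--             formatted_code += f"      {i} {line}\n"
--     return formatted_code
-- ===== SOURCE B (Python) =====
-- def format_error_lines(code, line_number):
--     code_lines = code.strip().split('\n')
--     start = max(1, line_number - 2)
--     stop = min(line_number + 1, len(code_lines))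
--     return "".join(
--         f"{'----> ' if i == line_number else '      '}{i} {code_lines[i - 1]}\n"
--         for i in range(start, stop + 1)
--     )
-- ===== Notes on version B (the rewrite author's own statement) =====
-- stated objective: simpler
-- what changed: B clamps the context window to the valid line range up front (start = max(1, line_number-2), stop = min(line_number+1, len(code_lines))) and formats only the lines indexed by range(start, stop+1), instead of A's scan over every line with a two-branch filter.
import Mathlib
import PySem

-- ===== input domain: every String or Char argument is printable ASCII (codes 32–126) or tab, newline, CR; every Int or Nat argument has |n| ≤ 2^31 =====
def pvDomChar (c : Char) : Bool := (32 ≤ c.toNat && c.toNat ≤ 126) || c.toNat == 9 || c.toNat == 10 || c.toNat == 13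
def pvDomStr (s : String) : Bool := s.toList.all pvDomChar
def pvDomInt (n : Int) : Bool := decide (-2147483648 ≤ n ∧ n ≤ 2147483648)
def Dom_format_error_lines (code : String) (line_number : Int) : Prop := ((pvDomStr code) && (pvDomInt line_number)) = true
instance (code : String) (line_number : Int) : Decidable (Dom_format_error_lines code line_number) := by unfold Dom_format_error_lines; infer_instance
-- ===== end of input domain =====

-- B clamps the context window to the valid line range up front and formats only the
-- lines indexed by range(start, stop+1), instead of A's scan over every line with a
-- two-branch filter (objective: simpler decomposition).

-- ===== PORT A =====
-- A's loop body: the two formatting branches, appending to the accumulator string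
-- (strings are carried as List Char via PySem.Chars; String.ofList at the end).
def feaStep (line_number : Int) (acc : List Char) (p : Int × List Char) : List Char :=
  if p.1 = line_number then
    acc ++ ("----> ".toList ++ PySem.Int.toChars p.1 ++ [' '] ++ p.2 ++ ['\n'])
  else if line_number - 2 ≤ p.1 ∧ p.1 ≤ line_number + 1 then
    acc ++ ("      ".toList ++ PySem.Int.toChars p.1 ++ [' '] ++ p.2 ++ ['\n'])
  else acc

def format_error_lines (code : String) (line_number : Int) : String :=
  let code_lines := PySem.Chars.splitOn (PySem.Chars.strip code.toList) "\n".toList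
  String.ofList ((PySem.List.enumerate code_lines 1).foldl (feaStep line_number) [])

-- ===== PORT B =====
-- B's per-line formatter: prefix chosen by one branch, then `{i} {line}\n`.
def febFmt (line_number : Int) (p : Int × List Char) : List Char :=
  (if p.1 = line_number then "----> ".toList else "      ".toList)
    ++ PySem.Int.toChars p.1 ++ [' '] ++ p.2 ++ ['\n']

def format_error_lines_alt (code : String) (line_number : Int) : String :=
  let code_lines := PySem.Chars.splitOn (PySem.Chars.strip code.toList) "\n".toList
  let start := max 1 (line_number - 2)
  let stop := min (line_number + 1) (code_lines.length : Int)
  String.ofList (PySem.Chars.join []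
    ((PySem.List.pyRange start (stop + 1) 1).map
      (fun i => febFmt line_number (i, PySem.List.pyGetD code_lines (i - 1) []))))

-- ===== PRECONDITION & SPEC =====
def Spec_format_error_lines (code : String) (line_number : Int) (out : String) : Prop := out = format_error_lines_alt code line_number
instance (code : String) (line_number : Int) (out : String) : Decidable (Spec_format_error_lines code line_number out) := by unfold Spec_format_error_lines; infer_instance

-- ===== CLAIM (what is proved, stated in full; the proofs are below) =====
def Claim_equal_format_error_lines : Prop := ∀ (code : String) (line_number : Int), Dom_format_error_lines code line_number → Spec_format_error_lines code line_number (format_error_lines code line_number)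

-- ===== LEMMAS AND PROOFS =====

-- ''.join is concatenation
theorem join_empty_sep (ps : List (List Char)) : PySem.Chars.join [] ps = ps.flatten := by
  induction ps with
  | nil => simp [PySem.Chars.join_nil]
  | cons p ps ih =>
    cases ps with
    | nil => simp [PySem.Chars.join_singleton]
    | cons q qs =>
      rw [PySem.Chars.join_cons_cons]
      simp [ih]

-- A's step is: append B's formatted line iff the index lies in the window.
theorem feaStep_eq (ln : Int) (acc : List Char) (p : Int × List Char) :
    feaStep ln acc p =
      acc ++ (if ln - 2 ≤ p.1 ∧ p.1 ≤ ln + 1 then febFmt ln p else []) := by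
  unfold feaStep febFmt
  by_cases h : p.1 = ln
  · simp [h]
  · simp [h]
    split_ifs <;> simp

-- Core window lemma: filtering an enumeration by lo ≤ i ≤ hi equals enumerating drop/take.
theorem window_core {α : Type} (f : Int × α → List Char) (lo hi : Int) :
    ∀ (xs : List α) (s : Int),
      (PySem.List.enumerate xs s).flatMap
          (fun p => if lo ≤ p.1 ∧ p.1 ≤ hi then f p else []) =
      (PySem.List.enumerate
          (((xs.drop (lo - s).toNat).take ((hi - s + 1).toNat - (lo - s).toNat)))
          (s + ((lo - s).toNat : Int))).flatMap f := by
  intro xs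
  induction xs with
  | nil => intro s; simp [PySem.List.enumerate]
  | cons x xs ih =>
    intro s
    rw [PySem.List.enumerate_cons, List.flatMap_cons]
    by_cases h1 : lo ≤ s
    · have ha : (lo - s).toNat = 0 := by omega
      have ha' : (lo - (s + 1)).toNat = 0 := by omega
      by_cases h2 : s ≤ hi
      · have hn : (hi - s + 1).toNat - (lo - s).toNat
            = ((hi - (s + 1) + 1).toNat - (lo - (s + 1)).toNat) + 1 := by omega
        rw [hn, ha]
        simp only [List.drop_zero, List.take_succ_cons, PySem.List.enumerate_cons,
          List.flatMap_cons, Nat.cast_zero, add_zero]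
        rw [if_pos ⟨h1, h2⟩]
        have ihs := ih (s + 1)
        rw [ha'] at ihs
        simp only [List.drop_zero, Nat.cast_zero, add_zero] at ihs
        rw [ihs, ha']
      · have hn : (hi - s + 1).toNat - (lo - s).toNat = 0 := by omega
        have hn' : (hi - (s + 1) + 1).toNat - (lo - (s + 1)).toNat = 0 := by omega
        rw [if_neg (by omega)]
        have ihs := ih (s + 1)
        rw [hn', ha'] at ihs
        simp only [List.drop_zero, List.take_zero] at ihs
        rw [hn, ha]
        simpa [PySem.List.enumerate] using ihs
    · have ha : (lo - s).toNat = (lo - (s + 1)).toNat + 1 := by omega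
      rw [if_neg (by omega), ha]
      have hn : (hi - s + 1).toNat - ((lo - (s + 1)).toNat + 1)
          = (hi - (s + 1) + 1).toNat - (lo - (s + 1)).toNat := by omega
      rw [hn, List.drop_succ_cons, ih (s + 1)]
      have hidx : s + ((((lo - (s + 1)).toNat + 1 : Nat)) : Int)
          = (s + 1) + (((lo - (s + 1)).toNat : Nat) : Int) := by push_cast; ring
      rw [hidx, List.nil_append]

-- B's indexed range over [s, s+k) equals mapping over an enumerated drop/take window.
theorem range_getD_enum {α β : Type} (f : Int × α → β) (d : α) :
    ∀ (k : Nat) (xs : List α) (s : Int), 0 ≤ s - 1 → (s - 1).toNat + k ≤ xs.length →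
      (PySem.List.pyRange s (s + (k : Int)) 1).map
          (fun i => f (i, PySem.List.pyGetD xs (i - 1) d)) =
      (PySem.List.enumerate ((xs.drop (s - 1).toNat).take k) s).map f := by
  intro k
  induction k with
  | zero =>
    intro xs s _ _
    simp [PySem.List.pyRange_one_eq_nil]
  | succ k ih =>
    intro xs s hs hlen
    have hlt : (s - 1).toNat < xs.length := by omega
    rw [PySem.List.pyRange_one_cons (by omega), List.map_cons]
    rw [List.drop_eq_getElem_cons hlt, List.take_succ_cons, PySem.List.enumerate_cons,
      List.map_cons]
    have hget : PySem.List.pyGetD xs (s - 1) d = xs[(s - 1).toNat] :=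
      PySem.List.pyGetD_eq_getElem xs d hs (by omega)
    rw [hget]
    have harg : s + ((k : Nat) + 1 : Int) = (s + 1) + (k : Int) := by ring
    have hd : (s - 1).toNat + 1 = ((s + 1) - 1).toNat := by omega
    have ihs := ih xs (s + 1) (by omega) (by omega)
    rw [← hd] at ihs
    rw [show (s + (((k : Nat) + 1 : Nat) : Int)) = (s + 1) + (k : Int) by push_cast; ring, ihs]

-- ===== VERDICT (by name: the statement is the Claim_ definition above) =====
theorem format_error_lines_spec : Claim_equal_format_error_lines := by
  unfold Claim_equal_format_error_lines Spec_format_error_lines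
  intro code ln _
  unfold format_error_lines format_error_lines_alt
  dsimp only
  set xs := PySem.Chars.splitOn (PySem.Chars.strip code.toList) "\n".toList with hxs
  congr 1
  rw [PySem.List.foldl_congr_mem (PySem.List.enumerate xs 1) (feaStep ln)
        (fun acc p => acc ++ (if ln - 2 ≤ p.1 ∧ p.1 ≤ ln + 1 then febFmt ln p else [])) []
        (fun acc p _ => feaStep_eq ln acc p)]
  rw [PySem.List.foldl_append_eq_flatMap, List.nil_append]
  rw [window_core (febFmt ln) (ln - 2) (ln + 1) xs 1]
  rw [join_empty_sep]
  -- align B's clamped range with A's drop/take window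
  set start := max 1 (ln - 2) with hstart
  set stop := min (ln + 1) ((xs.length : Nat) : Int) with hstop
  have hs1 : (1 : Int) + (((ln - 2 - 1).toNat : Nat) : Int) = start := by omega
  rw [hs1]
  by_cases hfeas : start - 1 ≤ (xs.length : Int)
  · -- the window start is inside (or at the end of) the list
    have htake : (xs.drop (ln - 2 - 1).toNat).take ((ln + 1 - 1 + 1).toNat - (ln - 2 - 1).toNat)
        = (xs.drop (start - 1).toNat).take (stop + 1 - start).toNat := by
      have hdrop : (ln - 2 - 1).toNat = (start - 1).toNat := by omega
      rw [hdrop, List.take_eq_take_iff]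
      simp only [List.length_drop]
      omega
    rw [htake]
    by_cases hle : stop + 1 ≤ start
    · -- empty window
      have hk0 : (stop + 1 - start).toNat = 0 := by omega
      rw [hk0, PySem.List.pyRange_one_eq_nil hle]
      simp
    · have hk : stop + 1 = start + (((stop + 1 - start).toNat : Nat) : Int) := by omega
      have hmap := range_getD_enum (febFmt ln) [] ((stop + 1 - start).toNat) xs start
        (by omega) (by omega)
      rw [← hk] at hmap
      rw [hmap, List.flatMap_def]
  · -- the window lies entirely past the end: both sides are empty
    have hempty : stop + 1 ≤ start := by omega
    rw [PySem.List.pyRange_one_eq_nil hempty]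
    have hdrop : xs.length ≤ (ln - 2 - 1).toNat := by omega
    rw [List.drop_eq_nil_of_le hdrop]
    simp
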